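-- pv_equiv track=rewrite | github.com/calico-team/calico-fa23 | rotate/experiments/rotate_dnc.py | solve
-- ===== SOURCE A (Python) =====
-- def solve(N, K):
--     if N % 2 == 0:
--         if K % 2 == 0:
--             return K // 2
--         return N // 2 + solve(N // 2, K // 2 + 1)
--     else:
--         if K % 2 == 0:
--             return K // 2
--         if K == 1:
--             return N // 2 + 1
--         return N // 2 + 1 + solve(N // 2, K // 2)
-- ===== SOURCE B (Python) =====
-- def solve(N, K):
--     # Bit-indexed loop: walks the bits of N with shifts instead of A's non-tail
--     # recursion on (N//2, ...), accumulating the answer in acc.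
--     acc = 0
--     i = 0
--     while K % 2 == 1:
--         b = (N >> i) & 1
--         half = N >> (i + 1)
--         if b == 1 and K == 1:
--             return acc + half + 1
--         acc += half + b
--         K = K // 2 + 1 - b
--         i += 1
--     return acc + K // 2
-- ===== Notes on version B (the rewrite author's own statement) =====
-- stated objective: alternative
-- what changed: Replaces A's non-tail recursion on a shrinking first argument (N//2, summing partial results on the way back up) by a bit-indexed loop over the ORIGINAL N: it reads the current half as N >> (i+1) and the branch bit as (N >> i) & 1, merges A's two K-even returns and folds A's two recursive branches into one update 'K = K//2 + 1 - b', carrying the answer in an accumulator.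
import Mathlib
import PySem

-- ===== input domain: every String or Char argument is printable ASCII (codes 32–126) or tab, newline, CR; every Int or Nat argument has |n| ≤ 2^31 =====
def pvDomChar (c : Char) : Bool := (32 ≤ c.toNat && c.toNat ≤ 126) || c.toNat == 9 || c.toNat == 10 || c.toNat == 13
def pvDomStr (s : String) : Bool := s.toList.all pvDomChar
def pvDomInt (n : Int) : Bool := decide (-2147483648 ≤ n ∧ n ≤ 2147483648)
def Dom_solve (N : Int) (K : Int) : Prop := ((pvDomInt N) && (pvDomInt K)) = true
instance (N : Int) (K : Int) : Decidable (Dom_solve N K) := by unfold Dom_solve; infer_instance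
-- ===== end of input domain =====

-- B replaces A's non-tail recursion on (N//2, …) by a bit-indexed loop over the ORIGINAL N
-- (reading N >> i instead of shrinking N) with an accumulator; same values, different decomposition.
-- Both ports carry a fuel parameter only to make the recursion/loop total; on Pre_solve it never runs out.

-- ===== PORT A =====
def solveFuelA (fuel : Nat) (N : Int) (K : Int) : Int :=
  match fuel with
  | 0 => 0
  | f + 1 =>
    if PySem.Int.mod N 2 = 0 then
      if PySem.Int.mod K 2 = 0 then PySem.Int.floordiv K 2
      else PySem.Int.floordiv N 2 + solveFuelA f (PySem.Int.floordiv N 2) (PySem.Int.floordiv K 2 + 1)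
    else
      if PySem.Int.mod K 2 = 0 then PySem.Int.floordiv K 2
      else if K = 1 then PySem.Int.floordiv N 2 + 1
      else PySem.Int.floordiv N 2 + 1 + solveFuelA f (PySem.Int.floordiv N 2) (PySem.Int.floordiv K 2)

def solve (N : Int) (K : Int) : Int := solveFuelA (N.natAbs + K.natAbs + 2) N K

-- ===== PORT B =====
-- Python's 'n >> k' on int is Lean's 'n >>> k' (floor shift, exact on negatives);
-- 'n & 1' is PySem.Int.band n 1.
def solveLoopB (fuel : Nat) (N : Int) (acc : Int) (i : Nat) (K : Int) : Int :=
  match fuel with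
  | 0 => acc
  | f + 1 =>
    if PySem.Int.mod K 2 = 1 then
      let b := PySem.Int.band (N >>> i) 1
      let half := N >>> (i + 1)
      if b = 1 ∧ K = 1 then acc + half + 1
      else solveLoopB f N (acc + half + b) (i + 1) (PySem.Int.floordiv K 2 + 1 - b)
    else acc + PySem.Int.floordiv K 2

def solve_alt (N : Int) (K : Int) : Int := solveLoopB (N.natAbs + K.natAbs + 2) N 0 0 K

-- ===== PRECONDITION & SPEC =====
-- Pre_solve excludes exactly K = 2*N + 1, the inputs on which the Python A recurses forever
-- (the invariant K = 2*N + 1 is preserved by every recursive call and no base case fires).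
def Pre_solve (N : Int) (K : Int) : Prop := K ≠ 2 * N + 1
instance (N : Int) (K : Int) : Decidable (Pre_solve N K) := by unfold Pre_solve; infer_instance
def pvWitness_solve : Int × Int := (10, 7)
def Spec_solve (N : Int) (K : Int) (out : Int) : Prop := out = solve_alt N K
instance (N : Int) (K : Int) (out : Int) : Decidable (Spec_solve N K out) := by unfold Spec_solve; infer_instance

-- ===== CLAIM (what is proved, stated in full; the proofs are below) =====
def Claim_equal_solve : Prop := ∀ (N : Int) (K : Int), Dom_solve N K → Pre_solve N K → Spec_solve N K (solve N K)

-- ===== LEMMAS AND PROOFS =====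
theorem shr_succ (n : Int) (i : Nat) : n >>> (i + 1) = PySem.Int.floordiv (n >>> i) 2 := by
  simp only [Int.shiftRight_eq_div_pow, PySem.Int.floordiv]
  rw [Int.fdiv_eq_ediv, if_pos (Or.inl (by norm_num)), sub_zero,
    Int.ediv_ediv_of_nonneg (by positivity)]
  norm_num [pow_succ]

-- B's loop at bit index i computes A's recursion started from N >> i.
theorem solveLoopB_eq (fuel : Nat) :
    ∀ (N acc : Int) (i : Nat) (K : Int),
      solveLoopB fuel N acc i K = acc + solveFuelA fuel (N >>> i) K := by
  induction fuel with
  | zero => intro N acc i K; simp [solveLoopB, solveFuelA]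
  | succ f ih =>
    intro N acc i K
    have hm : ∀ a : Int, PySem.Int.mod a 2 = a % 2 := fun a => by
      simp [PySem.Int.mod, Int.fmod_eq_emod]
    have hd : ∀ a : Int, PySem.Int.floordiv a 2 = a / 2 := fun a => by
      simp [PySem.Int.floordiv, Int.fdiv_eq_ediv]
    simp only [solveLoopB, solveFuelA, PySem.Int.band_one, shr_succ, hm, hd]
    rcases Int.emod_two_eq K with hK | hK <;>
      rcases Int.emod_two_eq (N >>> i) with hN | hN <;>
      simp [hK, hN, ih, shr_succ] <;> (try split_ifs) <;> omega

theorem shiftRight_zero' (n : Int) : n >>> (0 : Nat) = n := by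
  simp only [Int.shiftRight_eq_div_pow, pow_zero]
  norm_num

-- ===== VERDICT (by name: the statement is the Claim_ definition above) =====
theorem solve_spec : Claim_equal_solve := by
  intro N K _ _
  unfold Spec_solve solve solve_alt
  rw [solveLoopB_eq, shiftRight_zero']
  ring
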